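-- pv_equiv track=rewrite | github.com/karthikbmk/Information-Retrieval | bonus/cluster.py | prune_terms
-- ===== SOURCE A (Python) =====
-- from collections import Counter
-- from collections import defaultdict
--
-- def prune_terms(docs, min_df=3):
--     """ Remove terms that don't occur in at least min_df different
--     documents. Return a list of Counters. Omit documents that are empty after
--     pruning words.
--     >>> prune_terms([{'a': 1, 'b': 10}, {'a': 1}, {'c': 1}], min_df=2)
--     [Counter({'a': 1}), Counter({'a': 1})]
--     """
--     ###TODO
--
--     #Term and its doc freqs are stored in this dict
--     term_df = defaultdict(lambda:0)
--
--     for profile in docs: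
--         for term in profile.keys():
--             term_df[term] += 1
--
--     final_lst = []
--
--     for profile in docs:
--         temp_cntr = Counter()
--         for term in profile.keys():
--             if term_df[term] >= min_df:
--                 temp_cntr.update({term : profile[term]})
--         if len(temp_cntr) > 0:
--             final_lst.append(temp_cntr)
--
--     return final_lst
-- ===== SOURCE B (Python) =====
-- from collections import Counter
--
--
-- def prune_terms(docs, min_df=3):
--     """Remove terms that occur in fewer than min_df documents; drop documents
--     that end up empty. Document frequencies are found by sorting the flattened
--     term list and measuring each run of equal terms (sort-then-scan instead of
--     hash counting: a term occurs once per document that contains it)."""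
--     terms = sorted(t for doc in docs for t in doc)
--     kept = set()
--     run, n = None, 0
--     for t in terms:
--         if t == run:
--             n += 1
--         else:
--             if run is not None and n >= min_df:
--                 kept.add(run)
--             run, n = t, 1
--     if run is not None and n >= min_df:
--         kept.add(run)
--     out = []
--     for doc in docs:
--         pruned = Counter({t: c for t, c in doc.items() if t in kept})
--         if pruned:
--             out.append(pruned)
--     return out
-- ===== Notes on version B (the rewrite author's own statement) =====
-- stated objective: alternative
-- what changed: Document frequencies are computed by sorting the flattened term list and scanning runs of equal terms (sort-then-scan) instead of A's defaultdict counting, and the result documents are built by set-membership filtering comprehensions instead of Counter.update loops; Pre_ restricts the association-list encoding to documents with distinct keys, the exact images of Python dicts.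
import Mathlib
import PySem

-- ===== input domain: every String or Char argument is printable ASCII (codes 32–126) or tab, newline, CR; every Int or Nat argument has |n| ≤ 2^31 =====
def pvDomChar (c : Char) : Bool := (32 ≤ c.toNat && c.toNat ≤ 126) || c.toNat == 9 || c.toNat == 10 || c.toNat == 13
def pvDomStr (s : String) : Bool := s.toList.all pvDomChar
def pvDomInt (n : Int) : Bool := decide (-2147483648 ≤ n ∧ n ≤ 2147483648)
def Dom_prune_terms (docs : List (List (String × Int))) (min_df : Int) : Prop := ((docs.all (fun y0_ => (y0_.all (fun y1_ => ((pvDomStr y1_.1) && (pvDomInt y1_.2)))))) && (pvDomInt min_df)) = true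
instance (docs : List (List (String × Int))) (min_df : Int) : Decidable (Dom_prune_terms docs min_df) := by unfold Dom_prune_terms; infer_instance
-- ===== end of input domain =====

-- B replaces A's defaultdict document-frequency counting by sort-then-scan over the
-- flattened term list and builds each pruned document by a membership filter (alternative
-- algorithm, not claimed faster).

-- ===== PORT A =====
-- Each Python dict[str, int] arrives as its association list (unique keys under Pre_);
-- profile.keys() is the list of firsts, profile[term] is first-match lookup (term is
-- always present, so the total getD with default 0 returns exactly Python's value).
def prune_terms (docs : List (List (String × Int))) (min_df : Int) : List (List (String × Int)) :=
  let term_df : PySem.Dict String Int :=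
    docs.foldl (fun td profile =>
      (profile.map Prod.fst).foldl (fun td term => td.modify term 0 (· + 1)) td)
      PySem.Dict.empty
  let final_lst : List (List (String × Int)) :=
    docs.foldl (fun acc profile =>
      let temp_cntr : PySem.Dict String Int :=
        (profile.map Prod.fst).foldl (fun c term =>
          if min_df ≤ term_df.getD term 0 then
            c.modify term 0 (· + (PySem.Dict.mk profile).getD term 0)
          else c)
          PySem.Dict.empty
      if 0 < temp_cntr.size then acc ++ [temp_cntr.items] else acc) []
  final_lst

-- ===== PORT B =====
-- one step of the run scan over the sorted term list: state = (current run, its length, kept terms)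
def pruneRunStep (min_df : Int) (s : Option String × Int × PySem.Set String) (t : String) :
    Option String × Int × PySem.Set String :=
  match s with
  | (some r, n, kept) =>
      if t = r then (some r, n + 1, kept)
      else (some t, 1, if min_df ≤ n then PySem.Set.add kept r else kept)
  | (none, _, kept) => (some t, 1, kept)

-- final flush of the last run
def pruneRunFlush (min_df : Int) (s : Option String × Int × PySem.Set String) : PySem.Set String :=
  match s with
  | (some r, n, kept) => if min_df ≤ n then PySem.Set.add kept r else kept
  | (none, _, kept) => kept

def prune_terms_alt (docs : List (List (String × Int))) (min_df : Int) : List (List (String × Int)) :=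
  let terms : List String := PySem.List.sorted (docs.flatMap (fun doc => doc.map Prod.fst)) (fun t => t)
  let kept : PySem.Set String := pruneRunFlush min_df (terms.foldl (pruneRunStep min_df) (none, 0, PySem.Set.empty))
  docs.foldl (fun out doc =>
    let pruned := doc.filter (fun p => PySem.Set.contains kept p.1)
    if pruned.isEmpty = false then out ++ [pruned] else out) []

-- ===== PRECONDITION & SPEC =====
-- Pre_ restricts each document's association list to distinct keys: exactly the lists that
-- are images of Python dicts (a list with a duplicated key encodes no dict input of A).
def Pre_prune_terms (docs : List (List (String × Int))) (min_df : Int) : Prop :=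
  ∀ doc ∈ docs, (doc.map Prod.fst).Nodup
instance (docs : List (List (String × Int))) (min_df : Int) : Decidable (Pre_prune_terms docs min_df) := by unfold Pre_prune_terms; infer_instance

def pvWitness_prune_terms : (List (List (String × Int))) × Int :=
  ([[("a", 1), ("b", 10)], [("a", 1)], [("c", 1)]], 2)

def Spec_prune_terms (docs : List (List (String × Int))) (min_df : Int) (out : List (List (String × Int))) : Prop := out = prune_terms_alt docs min_df
instance (docs : List (List (String × Int))) (min_df : Int) (out : List (List (String × Int))) : Decidable (Spec_prune_terms docs min_df out) := by unfold Spec_prune_terms; infer_instance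

-- ===== CLAIM (what is proved, stated in full; the proofs are below) =====
def Claim_equal_prune_terms : Prop := ∀ (docs : List (List (String × Int))) (min_df : Int), Dom_prune_terms docs min_df → Pre_prune_terms docs min_df → Spec_prune_terms docs min_df (prune_terms docs min_df)

-- ===== LEMMAS AND PROOFS =====

-- A's document-frequency table is the Counter of the flattened key list
lemma term_df_eq_counter (docs : List (List (String × Int))) :
    docs.foldl (fun td profile =>
        (profile.map Prod.fst).foldl (fun td term => td.modify term 0 (· + 1)) td)
      (PySem.Dict.empty : PySem.Dict String Int)
      = PySem.Dict.counter (docs.flatMap (fun doc => doc.map Prod.fst)) := by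
  rw [PySem.Dict.counter_eq_foldl, List.foldl_flatMap]

-- the run scan, started inside a run of r of length n, collects exactly the terms whose
-- total multiplicity reaches min_df
lemma runScan_some (min_df : Int) (l : List String) : ∀ (r : String) (n : Int)
    (kept : PySem.Set String), l.Pairwise (· ≤ ·) → (∀ x ∈ l, r ≤ x) → ∀ (t : String),
    (t ∈ pruneRunFlush min_df (l.foldl (pruneRunStep min_df) (some r, n, kept)) ↔
      t ∈ kept ∨ (t = r ∧ min_df ≤ n + (l.count r : Int)) ∨
        (t ∈ l ∧ t ≠ r ∧ min_df ≤ (l.count t : Int))) := by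
  induction l with
  | nil =>
    intro r n kept _ _ t
    simp only [List.foldl_nil, pruneRunFlush, List.count_nil]
    split_ifs with h
    · simp [PySem.Set.mem_add]; tauto
    · simp; intro ht; omega
  | cons x xs ih =>
    intro r n kept hs hr t
    have hs' := (List.pairwise_cons.mp hs).2
    have hx : ∀ y ∈ xs, x ≤ y := (List.pairwise_cons.mp hs).1
    by_cases hxr : x = r
    · subst hxr
      simp only [List.foldl_cons, pruneRunStep, if_true]
      rw [ih x (n+1) kept hs' hx t]
      have hc1 : (List.count x (x :: xs) : Int) = (List.count x xs : Int) + 1 := by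
        rw [List.count_cons_self]; push_cast; ring
      constructor
      · rintro (h | ⟨rfl, h⟩ | ⟨h1, h2, h3⟩)
        · exact Or.inl h
        · exact Or.inr (Or.inl ⟨rfl, by omega⟩)
        · have hc2 : List.count t (x :: xs) = List.count t xs := List.count_cons_of_ne (Ne.symm h2)
          exact Or.inr (Or.inr ⟨List.mem_cons_of_mem _ h1, h2, by rw [hc2]; exact h3⟩)
      · rintro (h | ⟨rfl, h⟩ | ⟨h1, h2, h3⟩)
        · exact Or.inl h
        · exact Or.inr (Or.inl ⟨rfl, by omega⟩)
        · have h1' : t ∈ xs := by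
            rcases List.mem_cons.mp h1 with rfl | h1'
            · exact absurd rfl h2
            · exact h1'
          have hc2 : List.count t (x :: xs) = List.count t xs := List.count_cons_of_ne (Ne.symm h2)
          exact Or.inr (Or.inr ⟨h1', h2, by rw [hc2] at h3; exact h3⟩)
    · have hrx : r ≤ x := hr x List.mem_cons_self
      have hrlt : r < x := lt_of_le_of_ne hrx (fun h => hxr h.symm)
      have hrnot : r ∉ x :: xs := by
        intro hmem
        rcases List.mem_cons.mp hmem with rfl | hmem
        · exact hxr rfl
        · exact absurd (hx _ hmem) (not_le.mpr hrlt)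
      simp only [List.foldl_cons, pruneRunStep, if_neg hxr]
      rw [ih x 1 (if min_df ≤ n then PySem.Set.add kept r else kept) hs' hx t]
      have hcr : List.count r (x :: xs) = 0 := List.count_eq_zero.mpr hrnot
      have hmem' : t ∈ (if min_df ≤ n then PySem.Set.add kept r else kept) ↔
          t ∈ kept ∨ (t = r ∧ min_df ≤ n) := by
        split_ifs with hmin
        · rw [PySem.Set.mem_add]; tauto
        · constructor
          · exact fun h => Or.inl h
          · rintro (h | ⟨rfl, h⟩)
            · exact h
            · exact absurd h hmin
      rw [hmem']
      have hcx : (List.count x (x :: xs) : Int) = (List.count x xs : Int) + 1 := by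
        rw [List.count_cons_self]; push_cast; ring
      constructor
      · rintro ((h | ⟨rfl, h⟩) | ⟨rfl, h⟩ | ⟨h1, h2, h3⟩)
        · exact Or.inl h
        · exact Or.inr (Or.inl ⟨rfl, by rw [hcr]; push_cast; omega⟩)
        · exact Or.inr (Or.inr ⟨List.mem_cons_self, hxr, by omega⟩)
        · have htr : t ≠ r := ne_of_gt (lt_of_lt_of_le hrlt (hx t h1))
          have hc2 : List.count t (x :: xs) = List.count t xs := by
            by_cases htx : t = x
            · subst htx; exact absurd rfl h2
            · exact List.count_cons_of_ne (Ne.symm htx)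
          exact Or.inr (Or.inr ⟨List.mem_cons_of_mem _ h1, htr, by rw [hc2]; exact h3⟩)
      · rintro (h | ⟨rfl, h⟩ | ⟨h1, h2, h3⟩)
        · exact Or.inl (Or.inl h)
        · rw [hcr] at h
          exact Or.inl (Or.inr ⟨rfl, by push_cast at h; omega⟩)
        · by_cases htx : t = x
          · subst htx
            exact Or.inr (Or.inl ⟨rfl, by omega⟩)
          · have h1' : t ∈ xs := by
              rcases List.mem_cons.mp h1 with rfl | h1'
              · exact absurd rfl htx
              · exact h1'
            have hc2 : List.count t (x :: xs) = List.count t xs := List.count_cons_of_ne (Ne.symm htx)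
            exact Or.inr (Or.inr ⟨h1', htx, by rw [hc2] at h3; exact h3⟩)

lemma runScan_sorted (min_df : Int) (l : List String) (hs : l.Pairwise (· ≤ ·)) (t : String) :
    t ∈ pruneRunFlush min_df (l.foldl (pruneRunStep min_df) (none, 0, PySem.Set.empty)) ↔
      t ∈ l ∧ min_df ≤ (l.count t : Int) := by
  cases l with
  | nil => simp [pruneRunFlush, PySem.Set.empty]
  | cons x xs =>
    have hs' := (List.pairwise_cons.mp hs).2
    have hx : ∀ y ∈ xs, x ≤ y := (List.pairwise_cons.mp hs).1
    simp only [List.foldl_cons, pruneRunStep]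
    rw [runScan_some min_df xs x 1 PySem.Set.empty hs' hx t]
    have hcx : (List.count x (x :: xs) : Int) = (List.count x xs : Int) + 1 := by
      rw [List.count_cons_self]; push_cast; ring
    constructor
    · rintro (h | ⟨rfl, h⟩ | ⟨h1, h2, h3⟩)
      · exact absurd h (List.not_mem_nil)
      · exact ⟨List.mem_cons_self, by omega⟩
      · have hc2 : List.count t (x :: xs) = List.count t xs := List.count_cons_of_ne (Ne.symm h2)
        exact ⟨List.mem_cons_of_mem _ h1, by rw [hc2]; exact h3⟩
    · rintro ⟨h1, h2⟩
      by_cases htx : t = x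
      · subst htx
        exact Or.inr (Or.inl ⟨rfl, by omega⟩)
      · have h1' : t ∈ xs := by
          rcases List.mem_cons.mp h1 with rfl | h1'
          · exact absurd rfl htx
          · exact h1'
        have hc2 : List.count t (x :: xs) = List.count t xs := List.count_cons_of_ne (Ne.symm htx)
        exact Or.inr (Or.inr ⟨h1', htx, by rw [hc2] at h2; exact h2⟩)

lemma counter_loop_items (val : String → Int) (P : String → Prop) [DecidablePred P] :
    ∀ (ks : List String) (c : PySem.Dict String Int), ks.Nodup →
      (∀ t ∈ ks, c.contains t = false) →
      (ks.foldl (fun c term => if P term then c.modify term 0 (· + val term) else c) c).items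
        = c.items ++ (ks.filter (fun t => decide (P t))).map (fun t => (t, val t)) := by
  intro ks
  induction ks with
  | nil => intro c _ _; simp
  | cons k ks ih =>
    intro c hnd hfresh
    have hk : c.contains k = false := hfresh k List.mem_cons_self
    have hnd' : ks.Nodup := (List.nodup_cons.mp hnd).2
    have hkns : k ∉ ks := (List.nodup_cons.mp hnd).1
    by_cases hP : P k
    · have hmod : (c.modify k 0 (· + val k)).items = c.items ++ [(k, val k)] := by
        rw [PySem.Dict.modify, PySem.Dict.getD_of_not_contains _ _ hk,
          PySem.Dict.items_insert_of_not_contains _ _ hk]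
        norm_num
      have hfresh' : ∀ t ∈ ks, (c.modify k 0 (· + val k)).contains t = false := by
        intro t ht
        rw [PySem.Dict.contains_modify]
        have : (t == k) = false := by simp; rintro rfl; exact hkns ht
        simp [this, hfresh t (List.mem_cons_of_mem _ ht)]
      simp only [List.foldl_cons, if_pos hP]
      rw [ih _ hnd' hfresh', hmod]
      simp [hP]
    · simp only [List.foldl_cons, if_neg hP]
      rw [ih _ hnd' (fun t ht => hfresh t (List.mem_cons_of_mem _ ht))]
      simp [hP]

lemma filter_keys_map (P : String → Bool) :
    ∀ (profile : List (String × Int)), (profile.map Prod.fst).Nodup →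
      ((profile.map Prod.fst).filter P).map
          (fun t => (t, (PySem.Dict.mk profile).getD t 0))
        = profile.filter (fun p => P p.1) := by
  intro profile
  induction profile with
  | nil => simp
  | cons p rest ih =>
    intro hnd
    obtain ⟨k, v⟩ := p
    have hnd' : (rest.map Prod.fst).Nodup := (List.nodup_cons.mp (by simpa using hnd)).2
    have hknot : k ∉ rest.map Prod.fst := (List.nodup_cons.mp (by simpa using hnd)).1
    have hgk : (PySem.Dict.mk ((k, v) :: rest)).getD k 0 = v := by
      rw [PySem.Dict.getD_eq_get?_getD, PySem.Dict.get?_mk_cons]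
      simp
    have hrest : ∀ t ∈ (rest.map Prod.fst).filter P,
        (PySem.Dict.mk ((k, v) :: rest)).getD t 0 = (PySem.Dict.mk rest).getD t 0 := by
      intro t ht
      have htk : (k == t) = false := by
        simp
        rintro rfl
        exact hknot (List.mem_of_mem_filter ht)
      rw [PySem.Dict.getD_eq_get?_getD, PySem.Dict.get?_mk_cons, htk,
        if_neg (by simp), ← PySem.Dict.getD_eq_get?_getD]
    simp only [List.map_cons, List.filter_cons]
    by_cases hP : P k
    · have hmapeq : (((rest.map Prod.fst).filter P).map
            (fun t => (t, (PySem.Dict.mk ((k, v) :: rest)).getD t 0)))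
          = ((rest.map Prod.fst).filter P).map (fun t => (t, (PySem.Dict.mk rest).getD t 0)) :=
        List.map_congr_left (fun t ht => by rw [hrest t ht])
      simp only [hP, if_pos, List.map_cons, hgk]
      rw [hmapeq, ih hnd']
    · have hPf : P k = false := by simpa using hP
      have hmapeq : (((rest.map Prod.fst).filter P).map
            (fun t => (t, (PySem.Dict.mk ((k, v) :: rest)).getD t 0)))
          = ((rest.map Prod.fst).filter P).map (fun t => (t, (PySem.Dict.mk rest).getD t 0)) :=
        List.map_congr_left (fun t ht => by rw [hrest t ht])
      simp only [hPf, Bool.false_eq_true, if_false]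
      rw [hmapeq, ih hnd']

-- ===== VERDICT (by name: the statement is the Claim_ definition above) =====
theorem prune_terms_spec : Claim_equal_prune_terms := by
  intro docs min_df _hdom hpre
  unfold Spec_prune_terms prune_terms prune_terms_alt
  simp only [term_df_eq_counter]
  set allT := docs.flatMap (fun doc => doc.map Prod.fst) with hallT
  set terms := PySem.List.sorted allT (fun t => t) with hterms
  set kept := pruneRunFlush min_df (terms.foldl (pruneRunStep min_df) (none, 0, PySem.Set.empty)) with hkept
  have hsorted : terms.Pairwise (· ≤ ·) := PySem.List.sorted_pairwise allT (fun t => t)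
  have hperm : terms.Perm allT := PySem.List.sorted_perm allT (fun t => t) false
  have hkeptmem : ∀ t, t ∈ kept ↔ (t ∈ allT ∧ min_df ≤ (allT.count t : Int)) := by
    intro t
    rw [hkept, runScan_sorted min_df terms hsorted t, hperm.mem_iff, hperm.count_eq]
  have hcond : ∀ t, t ∈ allT →
      PySem.Set.contains kept t = decide (min_df ≤ (PySem.Dict.counter allT).getD t 0) := by
    intro t ht
    rw [PySem.Dict.getD_counter]
    rw [Bool.eq_iff_iff]
    simp only [PySem.Set.contains_iff, decide_eq_true_eq]
    rw [hkeptmem t]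
    tauto
  apply PySem.List.foldl_congr_mem
  intro acc profile hprof
  have hnd : (profile.map Prod.fst).Nodup := hpre profile hprof
  have hitems :
      ((profile.map Prod.fst).foldl (fun c term =>
          if min_df ≤ (PySem.Dict.counter allT).getD term 0 then
            c.modify term 0 (· + (PySem.Dict.mk profile).getD term 0)
          else c) (PySem.Dict.empty : PySem.Dict String Int)).items
        = profile.filter (fun p => PySem.Set.contains kept p.1) := by
    rw [counter_loop_items (fun t => (PySem.Dict.mk profile).getD t 0)
        (fun t => min_df ≤ (PySem.Dict.counter allT).getD t 0) (profile.map Prod.fst)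
        PySem.Dict.empty hnd (fun t _ => PySem.Dict.contains_empty t)]
    have hie : (PySem.Dict.empty : PySem.Dict String Int).items = [] := rfl
    rw [hie, List.nil_append]
    rw [filter_keys_map _ profile hnd]
    apply List.filter_congr
    intro p hp
    rw [hcond p.1]
    exact List.mem_flatMap.mpr ⟨profile, hprof, List.mem_map_of_mem hp⟩
  have hsize : ∀ (d : PySem.Dict String Int), d.size = d.items.length := fun d => rfl
  rw [hsize, hitems]
  by_cases hne : profile.filter (fun p => PySem.Set.contains kept p.1) = []
  · rw [hne]
    simp
  · rw [if_pos (by simpa [List.length_pos_iff] using hne),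
      if_pos (by simpa [List.isEmpty_eq_false_iff] using hne)]
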